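-- pv_equiv track=rewrite | github.com/vishwa-patel11/fuse | common/utilities.py | get_reinstated
-- ===== SOURCE A (Python) =====
-- def get_reinstated(l, t, p, r):
--   if (p == 'fytd') & (r):
--     l = [x-1 for x in l]
--   if len(l) < 2:
--     return ''
--   l = sorted([x for x in set(l) if x < t])[::-1]
--   if len(l) < 2:
--     return ''
--   if l[0] != t-1:
--     return ''
--   if l[0] == l[1] + 1:
--     return ''
-- ===== SOURCE B (Python) =====
-- def get_reinstated(l, t, p, r):
--     if p == 'fytd' and r:
--         l = [x - 1 for x in l]
--     if len(l) < 2: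
--         return ''
--     # single linear pass tracking the two largest distinct values below t
--     m1 = m2 = None
--     for x in l:
--         if x >= t or x == m1 or x == m2:
--             continue
--         if m1 is None or x > m1:
--             m1, m2 = x, m1
--         elif m2 is None or x > m2:
--             m2 = x
--     if m2 is None:
--         return ''
--     if m1 != t - 1:
--         return ''
--     if m1 == m2 + 1:
--         return ''
--     return None
-- ===== Notes on version B (the rewrite author's own statement) =====
-- stated objective: faster
-- what changed: Replaced building set(l), filtering and sorting it just to read the first two entries of the reversed sort by a single linear pass that tracks the two largest distinct values below t.
import Mathlib
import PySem

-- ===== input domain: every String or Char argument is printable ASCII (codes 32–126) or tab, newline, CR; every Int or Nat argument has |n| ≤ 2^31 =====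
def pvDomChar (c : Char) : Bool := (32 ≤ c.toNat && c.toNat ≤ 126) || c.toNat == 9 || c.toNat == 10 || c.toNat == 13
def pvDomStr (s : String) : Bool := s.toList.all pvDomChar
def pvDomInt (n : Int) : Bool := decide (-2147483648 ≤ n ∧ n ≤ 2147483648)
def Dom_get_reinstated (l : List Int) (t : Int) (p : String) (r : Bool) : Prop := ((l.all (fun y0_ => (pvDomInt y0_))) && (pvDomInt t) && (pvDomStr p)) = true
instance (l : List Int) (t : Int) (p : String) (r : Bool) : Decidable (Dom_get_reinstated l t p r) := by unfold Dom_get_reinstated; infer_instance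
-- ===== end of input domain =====

-- B replaces A's set/filter/sort/reverse/index pipeline by one linear pass keeping the
-- two largest distinct values below t (objective: faster, O(n) vs O(n log n)).

-- ===== PORT A =====
def get_reinstated (l : List Int) (t : Int) (p : String) (r : Bool) : Option String :=
  -- if (p == 'fytd') & (r): l = [x-1 for x in l]
  let l1 := if (p == "fytd") && r then l.map (fun x => x - 1) else l
  -- if len(l) < 2: return ''
  if PySem.List.len l1 < 2 then some "" else
  -- l = sorted([x for x in set(l) if x < t])[::-1]
  match PySem.List.slice?
      (PySem.List.sorted ((PySem.Set.ofList l1).filter (fun x => decide (x < t))) (fun x => x) false)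
      none none (-1) with
  | none => none   -- unreachable: step is -1 ≠ 0
  | some l2 =>
    -- if len(l) < 2: return ''
    if PySem.List.len l2 < 2 then some "" else
    -- if l[0] != t-1: return ''   (indices in range: len l2 ≥ 2)
    if PySem.List.pyGetD l2 0 0 ≠ t - 1 then some "" else
    -- if l[0] == l[1] + 1: return ''
    if PySem.List.pyGetD l2 0 0 = PySem.List.pyGetD l2 1 0 + 1 then some "" else
    -- falls off the end: None
    none

-- ===== PORT B =====
-- one step of B's loop over (m1, m2) = two largest distinct values < t seen so far
def grStep (t : Int) (acc : Option Int × Option Int) (x : Int) : Option Int × Option Int :=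
  match acc with
  | (m1, m2) =>
    if t ≤ x ∨ some x = m1 ∨ some x = m2 then (m1, m2)
    else
      match m1 with
      | none => (some x, m1)
      | some a =>
        if a < x then (some x, m1)
        else
          match m2 with
          | none => (m1, some x)
          | some b => if b < x then (m1, some x) else (m1, m2)

def get_reinstated_alt (l : List Int) (t : Int) (p : String) (r : Bool) : Option String :=
  let l1 := if (p == "fytd") && r then l.map (fun x => x - 1) else l
  if PySem.List.len l1 < 2 then some "" else
  match l1.foldl (grStep t) (none, none) with
  | (some a, some b) =>
    if a ≠ t - 1 then some "" else
    if a = b + 1 then some "" else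
    none
  | _ => some ""

-- ===== PRECONDITION & SPEC =====
def Spec_get_reinstated (l : List Int) (t : Int) (p : String) (r : Bool) (out : Option String) : Prop := out = get_reinstated_alt l t p r
instance (l : List Int) (t : Int) (p : String) (r : Bool) (out : Option String) : Decidable (Spec_get_reinstated l t p r out) := by unfold Spec_get_reinstated; infer_instance

-- ===== CLAIM (what is proved, stated in full; the proofs are below) =====
def Claim_equal_get_reinstated : Prop := ∀ (l : List Int) (t : Int) (p : String) (r : Bool), Dom_get_reinstated l t p r → Spec_get_reinstated l t p r (get_reinstated l t p r)

-- ===== LEMMAS AND PROOFS =====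

-- Characterisation of B's accumulator after scanning ys:
-- m1 is the maximum of the values of ys below t, m2 the maximum of the remaining ones.
def TopTwo (t : Int) (ys : List Int) (acc : Option Int × Option Int) : Prop :=
  (acc.1 = none → ∀ y ∈ ys, ¬ y < t) ∧
  (∀ a, acc.1 = some a → a ∈ ys ∧ a < t ∧ ∀ y ∈ ys, y < t → y ≤ a) ∧
  (∀ a, acc.1 = some a → acc.2 = none → ∀ y ∈ ys, y < t → y = a) ∧
  (∀ a b, acc.1 = some a → acc.2 = some b →
      b ∈ ys ∧ b < a ∧ ∀ y ∈ ys, y < t → y ≠ a → y ≤ b) ∧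
  (acc.1 = none → acc.2 = none)

theorem topTwo_nil (t : Int) : TopTwo t [] (none, none) := by
  refine ⟨fun _ y hy => absurd hy (by simp), ?_, ?_, ?_, fun _ => rfl⟩ <;> simp

theorem topTwo_step (t : Int) (ys : List Int) (acc : Option Int × Option Int) (x : Int)
    (h : TopTwo t ys acc) : TopTwo t (ys ++ [x]) (grStep t acc x) := by
  obtain ⟨m1, m2⟩ := acc
  obtain ⟨h0, h1, h2, h3, h4⟩ := h
  unfold grStep
  by_cases hskip : t ≤ x ∨ some x = m1 ∨ some x = m2
  · simp only [if_pos hskip]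
    -- skipped element: either x ≥ t or x already recorded
    refine ⟨?_, ?_, ?_, ?_, h4⟩
    · intro hn y hy
      replace hn : m1 = none := hn
      rcases List.mem_append.1 hy with hy | hy
      · exact h0 hn y hy
      · simp at hy; subst hy
        rcases hskip with h | h | h
        · omega
        · simp [hn] at h
        · have hm2 : m2 = none := h4 hn; simp [hm2] at h
    · intro a ha
      replace ha : m1 = some a := ha
      obtain ⟨ha1, ha2, ha3⟩ := h1 a ha
      refine ⟨List.mem_append.2 (Or.inl ha1), ha2, ?_⟩
      intro y hy hyt
      rcases List.mem_append.1 hy with hy | hy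
      · exact ha3 y hy hyt
      · simp at hy; subst hy
        rcases hskip with h | h | h
        · omega
        · simp [ha] at h; omega
        · rcases m2 with _ | b
          · simp at h
          · obtain ⟨_, hb2, _⟩ := h3 a b ha rfl
            simp at h; omega
    · intro a ha hm2 y hy hyt
      replace ha : m1 = some a := ha
      replace hm2 : m2 = none := hm2
      rcases List.mem_append.1 hy with hy | hy
      · exact h2 a ha hm2 y hy hyt
      · simp at hy; subst hy
        rcases hskip with h | h | h
        · omega
        · simp [ha] at h; omega
        · simp [hm2] at h
    · intro a b ha hb
      replace ha : m1 = some a := ha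
      replace hb : m2 = some b := hb
      obtain ⟨hb1, hb2, hb3⟩ := h3 a b ha hb
      refine ⟨List.mem_append.2 (Or.inl hb1), hb2, ?_⟩
      intro y hy hyt hyne
      rcases List.mem_append.1 hy with hy | hy
      · exact hb3 y hy hyt hyne
      · simp at hy; subst hy
        rcases hskip with h | h | h
        · omega
        · simp [ha] at h; omega
        · simp [hb] at h; omega
  · simp only [if_neg hskip]
    push_neg at hskip
    obtain ⟨hxlt, hxm1, hxm2⟩ := hskip
    rcases m1 with _ | a
    · -- m1 = none: new maximum x, m2 stays none (h4)
      have hm2 : m2 = none := h4 rfl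
      subst hm2
      refine ⟨by simp, ?_, ?_, by simp, by simp⟩
      · intro a ha; simp at ha; subst ha
        refine ⟨List.mem_append.2 (Or.inr (by simp)), hxlt, ?_⟩
        intro y hy hyt
        rcases List.mem_append.1 hy with hy | hy
        · exact absurd hyt (h0 rfl y hy)
        · simp at hy; omega
      · intro a ha _ y hy hyt; simp at ha; subst ha
        rcases List.mem_append.1 hy with hy | hy
        · exact absurd hyt (h0 rfl y hy)
        · simpa using hy
    · obtain ⟨ha1, ha2, ha3⟩ := h1 a rfl
      by_cases hax : a < x
      · simp only [if_pos hax]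
        -- x is the new maximum, a drops to second place
        refine ⟨by simp, ?_, by simp, ?_, by simp⟩
        · intro c hc; simp at hc; subst hc
          refine ⟨List.mem_append.2 (Or.inr (by simp)), hxlt, ?_⟩
          intro y hy hyt
          rcases List.mem_append.1 hy with hy | hy
          · exact le_trans (ha3 y hy hyt) (le_of_lt hax)
          · simp at hy; omega
        · intro c b hc hb; simp at hc hb; subst hc; subst hb
          refine ⟨List.mem_append.2 (Or.inl ha1), hax, ?_⟩
          intro y hy hyt hyne
          rcases List.mem_append.1 hy with hy | hy
          · exact ha3 y hy hyt
          · simp at hy; omega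
      · simp only [if_neg hax]
        have hxa : x < a := by
          have hne : x ≠ a := fun h => hxm1 (by rw [h])
          omega
        rcases m2 with _ | b
        · -- m2 = none: x becomes second
          refine ⟨by simp, ?_, by simp, ?_, by simp⟩
          · intro c hc; simp at hc; subst hc
            refine ⟨List.mem_append.2 (Or.inl ha1), ha2, ?_⟩
            intro y hy hyt
            rcases List.mem_append.1 hy with hy | hy
            · exact ha3 y hy hyt
            · simp at hy; omega
          · intro c b hc hb; simp at hc hb; subst hc; subst hb
            refine ⟨List.mem_append.2 (Or.inr (by simp)), hxa, ?_⟩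
            intro y hy hyt hyne
            rcases List.mem_append.1 hy with hy | hy
            · exact absurd (h2 a rfl rfl y hy hyt) hyne
            · simp at hy; omega
        · obtain ⟨hb1, hb2, hb3⟩ := h3 a b rfl rfl
          by_cases hbx : b < x
          · simp only [if_pos hbx]
            -- x replaces b as second
            refine ⟨by simp, ?_, by simp, ?_, by simp⟩
            · intro c hc; simp at hc; subst hc
              refine ⟨List.mem_append.2 (Or.inl ha1), ha2, ?_⟩
              intro y hy hyt
              rcases List.mem_append.1 hy with hy | hy
              · exact ha3 y hy hyt
              · simp at hy; omega
            · intro c d hc hd; simp at hc hd; subst hc; subst hd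
              refine ⟨List.mem_append.2 (Or.inr (by simp)), hxa, ?_⟩
              intro y hy hyt hyne
              rcases List.mem_append.1 hy with hy | hy
              · exact le_trans (hb3 y hy hyt hyne) (le_of_lt hbx)
              · simp at hy; omega
          · simp only [if_neg hbx]
            have hxb : x < b := by
              have hne : x ≠ b := fun h => hxm2 (by rw [h])
              omega
            refine ⟨by simp, ?_, by simp, ?_, by simp⟩
            · intro c hc; simp at hc; subst hc
              refine ⟨List.mem_append.2 (Or.inl ha1), ha2, ?_⟩
              intro y hy hyt
              rcases List.mem_append.1 hy with hy | hy
              · exact ha3 y hy hyt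
              · simp at hy; omega
            · intro c d hc hd; simp at hc hd; subst hc; subst hd
              refine ⟨List.mem_append.2 (Or.inl hb1), hb2, ?_⟩
              intro y hy hyt hyne
              rcases List.mem_append.1 hy with hy | hy
              · exact hb3 y hy hyt hyne
              · simp at hy; omega

theorem topTwo_foldl (t : Int) (xs : List Int) :
    TopTwo t xs (xs.foldl (grStep t) (none, none)) := by
  induction xs using List.reverseRecOn with
  | nil => exact topTwo_nil t
  | append_singleton ys x ih =>
    rw [List.foldl_append]
    exact topTwo_step t ys _ x ih

-- the distinct values of xs below t, as A builds them
def belowT (t : Int) (xs : List Int) : List Int :=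
  (PySem.Set.ofList xs).filter (fun x => decide (x < t))

theorem mem_belowT (t : Int) (xs : List Int) (y : Int) :
    y ∈ belowT t xs ↔ y ∈ xs ∧ y < t := by
  simp [belowT, List.mem_filter, PySem.Set.mem_ofList]

theorem nodup_belowT (t : Int) (xs : List Int) : (belowT t xs).Nodup :=
  (PySem.Set.nodup_ofList xs).filter _

-- A's reversed sorted list is strictly decreasing
theorem rev_pairwise (t : Int) (xs : List Int) :
    ((PySem.List.sorted (belowT t xs) (fun x => x) false).reverse).Pairwise (fun a b => b < a) := by
  rw [List.pairwise_reverse]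
  have hperm : (PySem.List.sorted (belowT t xs) (fun x => x) false).Perm (belowT t xs) :=
    PySem.List.sorted_perm _ _ _
  have hnd : (PySem.List.sorted (belowT t xs) (fun x => x) false).Nodup :=
    hperm.nodup_iff.2 (nodup_belowT t xs)
  have hle : (PySem.List.sorted (belowT t xs) (fun x => x) false).Pairwise (fun a b => a ≤ b) :=
    PySem.List.sorted_pairwise _ _
  exact (hle.and hnd).imp (fun {a b} h => lt_of_le_of_ne h.1 h.2)

theorem mem_rev (t : Int) (xs : List Int) (y : Int) :
    y ∈ (PySem.List.sorted (belowT t xs) (fun x => x) false).reverse ↔ y ∈ xs ∧ y < t := by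
  rw [List.mem_reverse, PySem.List.mem_sorted, mem_belowT]

-- main glue: on the transformed list, A's tail pipeline equals B's fold read-out
theorem tail_eq (t : Int) (xs : List Int) :
    (match PySem.List.slice? (PySem.List.sorted (belowT t xs) (fun x => x) false) none none (-1) with
      | none => (none : Option String)
      | some l2 =>
        if PySem.List.len l2 < 2 then some "" else
        if PySem.List.pyGetD l2 0 0 ≠ t - 1 then some "" else
        if PySem.List.pyGetD l2 0 0 = PySem.List.pyGetD l2 1 0 + 1 then some "" else
        none) =
    (match xs.foldl (grStep t) (none, none) with
      | (some a, some b) =>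
        if a ≠ t - 1 then some "" else
        if a = b + 1 then some "" else
        none
      | _ => some "") := by
  rw [PySem.List.slice?_none_none_neg_one]
  obtain ⟨hT0, hT1, hT2, hT3, hT4⟩ := topTwo_foldl t xs
  rcases hacc : xs.foldl (grStep t) (none, none) with ⟨m1, m2⟩
  rw [hacc] at hT0 hT1 hT2 hT3 hT4
  rcases hr : (PySem.List.sorted (belowT t xs) (fun x => x) false).reverse with _ | ⟨a, _ | ⟨b, rest⟩⟩
  · -- no value below t: m1 = none (else it would be a member of the empty reversed list)
    have hm1 : m1 = none := by
      rcases m1 with _ | c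
      · rfl
      · obtain ⟨hc1, hc2, _⟩ := hT1 c rfl
        have := (mem_rev t xs c).2 ⟨hc1, hc2⟩
        rw [hr] at this; simp at this
    have hm2 : m2 = none := hT4 hm1
    subst hm1; subst hm2
    simp [PySem.List.len]
  · -- exactly one value below t: m1 = that value, m2 = none
    have haS : a ∈ xs ∧ a < t := (mem_rev t xs a).1 (by rw [hr]; simp)
    have hm1 : m1 = some a := by
      rcases m1 with _ | c
      · exact absurd haS.2 (hT0 rfl a haS.1)
      · obtain ⟨hc1, hc2, _⟩ := hT1 c rfl
        have := (mem_rev t xs c).2 ⟨hc1, hc2⟩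
        rw [hr] at this; simp at this; subst this; rfl
    have hm2 : m2 = none := by
      rcases m2 with _ | d
      · rfl
      · subst hm1
        obtain ⟨hd1, hd2, _⟩ := hT3 a d rfl rfl
        have hdt : d < t := lt_trans hd2 haS.2
        have := (mem_rev t xs d).2 ⟨hd1, hdt⟩
        rw [hr] at this; simp at this; omega
    subst hm1; subst hm2
    simp [PySem.List.len]
  · -- at least two values below t: m1/m2 are the two largest
    have hpw := rev_pairwise t xs
    rw [hr] at hpw
    have hba : b < a := (List.pairwise_cons.1 hpw).1 b (by simp)
    have haS : a ∈ xs ∧ a < t := (mem_rev t xs a).1 (by rw [hr]; simp)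
    have hbS : b ∈ xs ∧ b < t := (mem_rev t xs b).1 (by rw [hr]; simp)
    have hmax : ∀ y ∈ xs, y < t → y ≤ a := by
      intro y hy hyt
      have hmem := (mem_rev t xs y).2 ⟨hy, hyt⟩
      rw [hr] at hmem
      rcases List.mem_cons.1 hmem with h | h
      · exact le_of_eq h
      · exact le_of_lt ((List.pairwise_cons.1 hpw).1 y h)
    have hsecond : ∀ y ∈ xs, y < t → y ≠ a → y ≤ b := by
      intro y hy hyt hyne
      have hmem := (mem_rev t xs y).2 ⟨hy, hyt⟩
      rw [hr] at hmem
      rcases List.mem_cons.1 hmem with h | h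
      · exact absurd h hyne
      · rcases List.mem_cons.1 h with h | h
        · exact le_of_eq h
        · exact le_of_lt ((List.pairwise_cons.1 (List.pairwise_cons.1 hpw).2).1 y h)
    have hm1 : m1 = some a := by
      rcases m1 with _ | c
      · exact absurd haS.2 (hT0 rfl a haS.1)
      · obtain ⟨hc1, hc2, hc3⟩ := hT1 c rfl
        have hca : c ≤ a := hmax c hc1 hc2
        have hac : a ≤ c := hc3 a haS.1 haS.2
        have : c = a := le_antisymm hca hac
        rw [this]
    subst hm1
    have hm2 : m2 = some b := by
      rcases m2 with _ | d
      · have := hT2 a rfl rfl b hbS.1 hbS.2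
        omega
      · obtain ⟨hd1, hd2, hd3⟩ := hT3 a d rfl rfl
        have hdt : d < t := lt_trans hd2 haS.2
        have hdb : d ≤ b := hsecond d hd1 hdt (by omega)
        have hbd : b ≤ d := hd3 b hbS.1 hbS.2 (by omega)
        have : d = b := le_antisymm hdb hbd
        rw [this]
    subst hm2
    -- both sides now do the same two tests on a and b
    have hlen : ¬ PySem.List.len (a :: b :: rest) < 2 := by
      simp [PySem.List.len]
    simp only [if_neg hlen, PySem.List.pyGetD_zero_cons]
    have h1 : PySem.List.pyGetD (a :: b :: rest) 1 0 = b := by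
      have he : (1 : Int) = ((1 : Nat) : Int) := by norm_num
      rw [he, PySem.List.pyGetD_natCast]
      rfl
    rw [h1]

-- ===== VERDICT (by name: the statement is the Claim_ definition above) =====
theorem get_reinstated_spec : Claim_equal_get_reinstated := by
  intro l t p r _
  unfold Spec_get_reinstated get_reinstated get_reinstated_alt
  dsimp only
  by_cases h2 : PySem.List.len (if (p == "fytd") && r then l.map (fun x => x - 1) else l) < 2
  · simp only [if_pos h2]
  · simp only [if_neg h2]
    exact tail_eq t (if (p == "fytd") && r then l.map (fun x => x - 1) else l)
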